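-- pv_equiv track=rewrite | github.com/anjali99vinod/Bayut_Scraper- | Bayut/Bayut/spiders/Bayut1.py | extract_bed_bath_size
-- ===== SOURCE A (Python) =====
-- def extract_bed_bath_size(text):
--     if not text:
--         return {'beds': '', 'baths': '', 'sqft': ''}
--     parts = text.split()
--     result = {'beds': '', 'baths': '', 'sqft': ''}
--     for i, part in enumerate(parts):
--         if part.isdigit() or part.replace('.', '').isdigit():
--             if i + 1 < len(parts):
--                 if 'bed' in parts[i + 1].lower():
--                     result['beds'] = part
--                 elif 'bath' in parts[i + 1].lower():
--                     result['baths'] = part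
--                 elif 'sqft' in parts[i + 1].lower():
--                     result['sqft'] = part
--     return result
-- ===== SOURCE B (Python) =====
-- def extract_bed_bath_size(text):
--     if not text:
--         return {'beds': '', 'baths': '', 'sqft': ''}
--     parts = text.split()
--     pairs = list(zip(parts, parts[1:]))
--
--     def slot(word):
--         w = word.lower()
--         if 'bed' in w:
--             return 'beds'
--         if 'bath' in w:
--             return 'baths'
--         if 'sqft' in w:
--             return 'sqft'
--         return None
--
--     def last_value(key):
--         for num, word in reversed(pairs):
--             if slot(word) == key and (num.isdigit() or num.replace('.', '').isdigit()):
--                 return num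
--         return ''
--
--     return {key: last_value(key) for key in ('beds', 'baths', 'sqft')}
-- ===== Notes on version B (the rewrite author's own statement) =====
-- stated objective: alternative
-- what changed: Replaced A's single stateful pass (a dict mutated while scanning numeric tokens and peeking at the next token) by a staged computation: build the list of adjacent (token, next-token) pairs once with zip, classify the following word into a slot, and fill each of the three slots independently by a reverse search for the first matching pair, which equals A's last-overwrite-wins semantics.
import Mathlib
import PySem

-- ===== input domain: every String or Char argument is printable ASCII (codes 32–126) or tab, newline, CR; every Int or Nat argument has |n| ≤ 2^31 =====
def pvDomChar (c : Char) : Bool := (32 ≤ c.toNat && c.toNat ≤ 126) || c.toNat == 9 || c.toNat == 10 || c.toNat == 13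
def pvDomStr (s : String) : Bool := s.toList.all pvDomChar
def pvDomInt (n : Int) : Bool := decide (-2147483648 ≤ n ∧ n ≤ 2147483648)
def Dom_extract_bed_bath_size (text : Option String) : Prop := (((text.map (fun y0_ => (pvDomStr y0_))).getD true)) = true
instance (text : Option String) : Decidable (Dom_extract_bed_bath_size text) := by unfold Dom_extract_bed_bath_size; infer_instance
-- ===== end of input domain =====

-- B replaces A's single stateful pass (overwriting a dict while peeking at the next token) by a
-- staged computation: build the list of adjacent (token, next-token) pairs once, then fill each of
-- the three slots independently by a reverse search for the first matching pair
-- (objective: alternative algorithm, same cost).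

-- shared helper: part.isdigit() or part.replace('.', '').isdigit()
def pvNumeric (tok : String) : Bool :=
  PySem.Str.strIsdigit tok || PySem.Str.strIsdigit (PySem.Str.replace tok "." "")

-- ===== PORT A =====
-- A's loop body: numeric token at index i, forward peek at parts[i+1], elif chain bed/bath/sqft
def pvStepA (parts : List String) (d : PySem.Dict String String) (ip : Int × String) :
    PySem.Dict String String :=
  if pvNumeric ip.2 then
    if ip.1 + 1 < (parts.length : Int) then
      match PySem.List.pyGet? parts (ip.1 + 1) with
      | some nxt =>
        if PySem.Str.isIn "bed" (PySem.Str.lower nxt) then d.insert "beds" ip.2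
        else if PySem.Str.isIn "bath" (PySem.Str.lower nxt) then d.insert "baths" ip.2
        else if PySem.Str.isIn "sqft" (PySem.Str.lower nxt) then d.insert "sqft" ip.2
        else d
      | none => d
    else d
  else d

def extract_bed_bath_size (text : Option String) : List (String × String) :=
  match text with
  | none => (PySem.Dict.ofList [("beds", ""), ("baths", ""), ("sqft", "")]).items
  | some s =>
    if s = "" then (PySem.Dict.ofList [("beds", ""), ("baths", ""), ("sqft", "")]).items
    else
      let parts := PySem.Str.split₀ s
      let result := PySem.Dict.ofList [("beds", ""), ("baths", ""), ("sqft", "")]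
      (List.foldl (pvStepA parts) result (PySem.List.enumerate parts)).items

-- ===== PORT B =====
-- B's slot classifier: which key a following word selects (same elif priority as A)
def pvSlot (word : String) : Option String :=
  let w := PySem.Str.lower word
  if PySem.Str.isIn "bed" w then some "beds"
  else if PySem.Str.isIn "bath" w then some "baths"
  else if PySem.Str.isIn "sqft" w then some "sqft"
  else none

-- B's per-key reverse search over the adjacent pairs (first match from the right, else '')
def pvLastValue (pairs : List (String × String)) (key : String) : String :=
  match pairs.reverse.find? (fun nw => pvSlot nw.2 == some key && pvNumeric nw.1) with
  | some nw => nw.1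
  | none => ""

def extract_bed_bath_size_alt (text : Option String) : List (String × String) :=
  match text with
  | none => [("beds", ""), ("baths", ""), ("sqft", "")]
  | some s =>
    if s = "" then [("beds", ""), ("baths", ""), ("sqft", "")]
    else
      let parts := PySem.Str.split₀ s
      let pairs := List.zip parts (PySem.List.slice parts (some 1) none)   -- zip(parts, parts[1:])
      [("beds", pvLastValue pairs "beds"),
       ("baths", pvLastValue pairs "baths"),
       ("sqft", pvLastValue pairs "sqft")]

-- ===== PRECONDITION & SPEC =====
def Spec_extract_bed_bath_size (text : Option String) (out : List (String × String)) : Prop := out = extract_bed_bath_size_alt text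
instance (text : Option String) (out : List (String × String)) : Decidable (Spec_extract_bed_bath_size text out) := by unfold Spec_extract_bed_bath_size; infer_instance

-- ===== CLAIM (what is proved, stated in full; the proofs are below) =====
def Claim_equal_extract_bed_bath_size : Prop := ∀ (text : Option String), Dom_extract_bed_bath_size text → Spec_extract_bed_bath_size text (extract_bed_bath_size text)

-- ===== LEMMAS AND PROOFS =====

-- the effect of one adjacent pair (numeric candidate p, keyword candidate q) on A's dict
def pvPairStep (d : PySem.Dict String String) (p q : String) : PySem.Dict String String :=
  if pvNumeric p then
    if PySem.Str.isIn "bed" (PySem.Str.lower q) then d.insert "beds" p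
    else if PySem.Str.isIn "bath" (PySem.Str.lower q) then d.insert "baths" p
    else if PySem.Str.isIn "sqft" (PySem.Str.lower q) then d.insert "sqft" p
    else d
  else d

-- walk that consumes adjacent pairs left to right (the shape A's forward peek produces)
def pvAWalk (d : PySem.Dict String String) : List String → PySem.Dict String String
  | p :: q :: rest => pvAWalk (pvPairStep d p q) (q :: rest)
  | _ => d

def pvInit : PySem.Dict String String :=
  PySem.Dict.ofList [("beds", ""), ("baths", ""), ("sqft", "")]

-- canonical three-slot dict determined by the pair list
def pvTriple (pairs : List (String × String)) : PySem.Dict String String :=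
  PySem.Dict.ofList [("beds", pvLastValue pairs "beds"),
                     ("baths", pvLastValue pairs "baths"),
                     ("sqft", pvLastValue pairs "sqft")]

lemma pvA_fold (xs : List String) : ∀ (pre : List String) (d : PySem.Dict String String),
    List.foldl (pvStepA (pre ++ xs)) d (PySem.List.enumerate xs (pre.length : Int)) =
    pvAWalk d xs := by
  induction xs with
  | nil => intro pre d; simp [PySem.List.enumerate_nil, pvAWalk]
  | cons x xs ih =>
    intro pre d
    rw [PySem.List.enumerate_cons, List.foldl_cons]
    cases xs with
    | nil =>
      have hstep : pvStepA (pre ++ [x]) d ((pre.length : Int), x) = d := by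
        simp [pvStepA, List.length_append]
      rw [hstep]
      simp [pvAWalk, PySem.List.enumerate_nil]
    | cons y ys =>
      have hstep : pvStepA (pre ++ x :: y :: ys) d ((pre.length : Int), x) =
          pvPairStep d x y := by
        have hlt : ((pre.length : Int) + 1 < ((pre ++ x :: y :: ys).length : Int)) := by
          simp [List.length_append]
        have hget : PySem.List.pyGet? (pre ++ x :: y :: ys) ((pre.length : Int) + 1) = some y := by
          rw [show ((pre.length : Int) + 1) = ((pre.length + 1 : Nat) : Int) by omega]
          rw [PySem.List.pyGet?_natCast, List.getElem?_append_right (by omega)]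
          simp
        simp only [pvStepA, pvPairStep, hlt, if_true, hget]
      rw [hstep]
      have hrec := ih (pre ++ [x]) (pvPairStep d x y)
      simp only [List.length_append, List.length_singleton, List.append_assoc,
        List.cons_append, List.nil_append] at hrec
      rw [show ((pre.length : Int) + 1) = ((pre.length + 1 : Nat) : Int) by omega]
      rw [hrec]
      rfl

-- the left-to-right pair walk is a fold over zip(parts, parts[1:])
lemma pvAWalk_zip (xs : List String) : ∀ (d : PySem.Dict String String),
    pvAWalk d xs = List.foldl (fun d nw => pvPairStep d nw.1 nw.2) d (xs.zip xs.tail) := by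
  induction xs with
  | nil => intro d; rfl
  | cons p xs ih =>
    intro d
    cases xs with
    | nil => rfl
    | cons q rest =>
      simp only [pvAWalk, List.tail_cons, List.zip_cons_cons, List.foldl_cons]
      exact ih (pvPairStep d p q)

-- appending one pair on the right updates each slot iff it matches
lemma pvLastValue_append (pairs : List (String × String)) (nw : String × String) (key : String) :
    pvLastValue (pairs ++ [nw]) key =
      if (pvSlot nw.2 == some key && pvNumeric nw.1) then nw.1 else pvLastValue pairs key := by
  simp only [pvLastValue, List.reverse_append, List.reverse_singleton, List.singleton_append,
    List.find?_cons]
  split_ifs with h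
  · simp [h]
  · simp [h]

-- inserting into the canonical three-slot dict overwrites the matching slot in place
lemma pvIns_beds (a b c v : String) :
    (PySem.Dict.ofList [("beds", a), ("baths", b), ("sqft", c)]).insert "beds" v =
    PySem.Dict.ofList [("beds", v), ("baths", b), ("sqft", c)] := rfl

lemma pvIns_baths (a b c v : String) :
    (PySem.Dict.ofList [("beds", a), ("baths", b), ("sqft", c)]).insert "baths" v =
    PySem.Dict.ofList [("beds", a), ("baths", v), ("sqft", c)] := rfl

lemma pvIns_sqft (a b c v : String) :
    (PySem.Dict.ofList [("beds", a), ("baths", b), ("sqft", c)]).insert "sqft" v =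
    PySem.Dict.ofList [("beds", a), ("baths", b), ("sqft", v)] := rfl

-- the fold over the pairs computes exactly the canonical three-slot dict
lemma pvFold_triple (pairs : List (String × String)) :
    List.foldl (fun d nw => pvPairStep d nw.1 nw.2) pvInit pairs = pvTriple pairs := by
  induction pairs using List.reverseRecOn with
  | nil => rfl
  | append_singleton pairs nw ih =>
    rw [List.foldl_append, ih, List.foldl_cons, List.foldl_nil]
    obtain ⟨n, w⟩ := nw
    show pvPairStep (pvTriple pairs) n w = pvTriple (pairs ++ [(n, w)])
    unfold pvPairStep pvTriple
    by_cases hn : pvNumeric n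
    · simp only [hn, if_true]
      by_cases h1 : PySem.Str.isIn "bed" (PySem.Str.lower w) = true
      · have hslot : pvSlot w = some "beds" := by
          have h1' := h1; simp at h1'; simp [pvSlot, h1']
        simp only [h1, if_true, pvLastValue_append, hslot, hn]
        simp [pvIns_beds]
      · simp only [h1]
        by_cases h2 : PySem.Str.isIn "bath" (PySem.Str.lower w) = true
        · have hslot : pvSlot w = some "baths" := by
            have h1' := h1; have h2' := h2; simp at h1' h2'; simp [pvSlot, h1', h2']
          simp only [h2, if_true, pvLastValue_append, hslot, hn]
          simp [pvIns_baths]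
        · simp only [h2]
          by_cases h3 : PySem.Str.isIn "sqft" (PySem.Str.lower w) = true
          · have hslot : pvSlot w = some "sqft" := by
              have h1' := h1; have h2' := h2; have h3' := h3; simp at h1' h2' h3'
              simp [pvSlot, h1', h2', h3']
            simp only [h3, if_true, pvLastValue_append, hslot, hn]
            simp [pvIns_sqft]
          · have h3' := h3; simp at h3'
            have hslot : pvSlot w = none := by
              have h1' := h1; have h2' := h2; simp at h1' h2'
              simp [pvSlot, h1', h2', h3']
            simp [h3', pvLastValue_append, hslot]
    · have hf : pvNumeric n = false := by simpa using hn
      simp [hf, pvLastValue_append]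

-- ===== VERDICT (by name: the statement is the Claim_ definition above) =====
theorem extract_bed_bath_size_spec : Claim_equal_extract_bed_bath_size := by
  intro text _
  unfold Spec_extract_bed_bath_size extract_bed_bath_size extract_bed_bath_size_alt
  cases text with
  | none => rfl
  | some s =>
    by_cases hs : s = ""
    · simp only [hs, if_true]; rfl
    · simp only [hs, if_false]
      have hA := pvA_fold (PySem.Str.split₀ s) [] pvInit
      simp only [List.nil_append, List.length_nil, Nat.cast_zero] at hA
      rw [show PySem.Dict.ofList [("beds", ""), ("baths", ""), ("sqft", "")] = pvInit from rfl, hA,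
        pvAWalk_zip, pvFold_triple, PySem.List.slice_from_one]
      rfl
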